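-- pv_equiv track=rewrite | github.com/GitdohunKim/boj-programmers-solution | 프로그래머스/unrated/181902. 문자 개수 세기/문자 개수 세기.py | solution
-- ===== SOURCE A (Python) =====
-- def solution(my_string):
--     count = [0] * 52  # 알파벳 개수를 담을 배열 초기화
--
--     for char in my_string:
--         if char.isupper():  # 대문자인 경우
--             index = ord(char) - ord('A')  # 알파벳 인덱스 계산
--             count[index] += 1
--         elif char.islower():  # 소문자인 경우
--             index = ord(char) - ord('a') + 26  # 알파벳 인덱스 계산
--             count[index] += 1
--
--     return count
-- ===== SOURCE B (Python) =====
-- ALPHABET = 'ABCDEFGHIJKLMNOPQRSTUVWXYZabcdefghijklmnopqrstuvwxyz'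
--
-- def solution(my_string):
--     return [my_string.count(c) for c in ALPHABET]
-- ===== Notes on version B (the rewrite author's own statement) =====
-- stated objective: idiomatic
-- what changed: B drops the counting array entirely: it iterates over the 52-letter alphabet and counts each letter with str.count over the string, instead of A's single scan of the string dispatching by case into a preallocated ord-indexed 52-slot array.
import Mathlib
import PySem

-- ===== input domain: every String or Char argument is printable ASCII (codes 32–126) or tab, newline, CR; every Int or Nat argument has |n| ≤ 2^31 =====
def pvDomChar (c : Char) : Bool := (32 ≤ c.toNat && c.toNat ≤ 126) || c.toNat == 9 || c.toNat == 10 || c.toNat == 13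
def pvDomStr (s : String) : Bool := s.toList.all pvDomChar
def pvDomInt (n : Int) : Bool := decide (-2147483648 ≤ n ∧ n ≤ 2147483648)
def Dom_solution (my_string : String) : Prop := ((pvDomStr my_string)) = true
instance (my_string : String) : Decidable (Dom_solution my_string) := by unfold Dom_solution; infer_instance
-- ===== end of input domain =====

-- B replaces A's single scan dispatching into a preallocated 52-slot array by an
-- iteration over the alphabet that counts each letter with str.count (idiomatic; 52 passes, not faster).


-- ===== PORT A =====
-- count[index] += 1: index is always in [0, 52) here, so the read is List.getD and the
-- write List.set (exact; Python would only raise out of range, which cannot happen).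
def solution (my_string : String) : List Int :=
  my_string.toList.foldl
    (fun count char =>
      if PySem.Chars.isupper char then
        let index := char.toNat - 65          -- ord(char) - ord('A')
        count.set index (count.getD index 0 + 1)
      else if PySem.Chars.islower char then
        let index := char.toNat - 97 + 26     -- ord(char) - ord('a') + 26
        count.set index (count.getD index 0 + 1)
      else count)
    (List.replicate 52 0)

-- ===== PORT B =====
def pvAlphabet : List Char :=
  "ABCDEFGHIJKLMNOPQRSTUVWXYZabcdefghijklmnopqrstuvwxyz".toList

-- [my_string.count(c) for c in ALPHABET]; my_string.count(c) is PySem.Str.count on the one-char string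
def solution_alt (my_string : String) : List Int :=
  pvAlphabet.map (fun c => (PySem.Str.count my_string (String.ofList [c]) : Int))

-- ===== PRECONDITION & SPEC =====
def Spec_solution (my_string : String) (out : List Int) : Prop := out = solution_alt my_string
instance (my_string : String) (out : List Int) : Decidable (Spec_solution my_string out) := by unfold Spec_solution; infer_instance

-- ===== CLAIM =====
def Claim_equal_solution : Prop := ∀ (my_string : String), Dom_solution my_string → Spec_solution my_string (solution my_string)

-- ===== LEMMAS AND PROOFS =====

-- str.count of a single character equals the character count
theorem pv_count_go_single (c : Char) : ∀ (fuel : Nat) (cs : List Char) (acc : Nat), cs.length ≤ fuel →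
    PySem.Chars.count.go [c] fuel cs acc = acc + cs.count c := by
  intro fuel
  induction fuel with
  | zero =>
    intro cs acc h
    cases cs with
    | nil => simp [PySem.Chars.count.go]
    | cons hd t => simp at h
  | succ n ih =>
    intro cs acc h
    cases cs with
    | nil => simp [PySem.Chars.count.go]
    | cons hd t =>
      simp only [PySem.Chars.count.go, List.isPrefixOf, List.count_cons]
      by_cases he : hd = c
      · subst he
        simp only [beq_self_eq_true, Bool.and_eq_true]
        simp [ih t (acc+1) (by simpa using h)]
        omega
      · have : (c == hd) = false := by simp [Ne.symm he]
        simp [this, ih t acc (by simpa using h), he]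

theorem pv_count_single (cs : List Char) (c : Char) : PySem.Chars.count cs [c] = cs.count c := by
  simp [PySem.Chars.count, pv_count_go_single c cs.length cs 0 le_rfl]

-- the i-th alphabet letter
def pvLetter (i : Nat) : Char := pvAlphabet.getD i 'A'

theorem pvLetter_toNat : ∀ i, i < 52 → (pvLetter i).toNat = if i < 26 then 65 + i else 71 + i := by
  decide

theorem pv_char_toNat_inj {c d : Char} (h : c.toNat = d.toNat) : c = d :=
  Char.ext (UInt32.toNat_inj.mp h)

theorem pv_le_toNat (a c : Char) : (a ≤ c) ↔ a.val.toNat ≤ c.val.toNat := by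
  rw [show a ≤ c ↔ a.val ≤ c.val from Iff.rfl, UInt32.le_iff_toNat_le]

theorem pv_isupper_iff (c : Char) : PySem.Chars.isupper c = true ↔ 65 ≤ c.toNat ∧ c.toNat ≤ 90 := by
  unfold PySem.Chars.isupper
  simp only [Bool.and_eq_true, decide_eq_true_eq, pv_le_toNat]
  exact Iff.rfl

theorem pv_islower_iff (c : Char) : PySem.Chars.islower c = true ↔ 97 ≤ c.toNat ∧ c.toNat ≤ 122 := by
  unfold PySem.Chars.islower
  simp only [Bool.and_eq_true, decide_eq_true_eq, pv_le_toNat]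
  exact Iff.rfl

-- the A-side loop step
def pvStepA (count : List Int) (char : Char) : List Int :=
  if PySem.Chars.isupper char then
    let index := char.toNat - 65
    count.set index (count.getD index 0 + 1)
  else if PySem.Chars.islower char then
    let index := char.toNat - 97 + 26
    count.set index (count.getD index 0 + 1)
  else count

theorem pvStepA_length (count : List Int) (c : Char) : (pvStepA count c).length = count.length := by
  unfold pvStepA; split_ifs <;> simp

-- one A-step read through getD: slot i gains 1 exactly when the scanned char is letter i
theorem pvStepA_getD (count : List Int) (hlen : count.length = 52) (a : Char)
    (i : Nat) (hi : i < 52) :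
    (pvStepA count a).getD i 0 = count.getD i 0 + (if pvLetter i = a then 1 else 0) := by
  have hLi := pvLetter_toNat i hi
  by_cases hu : PySem.Chars.isupper a = true
  · obtain ⟨h1, h2⟩ := (pv_isupper_iff a).mp hu
    have hpv : pvStepA count a
        = count.set (a.toNat - 65) (count.getD (a.toNat - 65) 0 + 1) := by
      simp only [pvStepA, hu, if_true]
    rw [hpv]
    by_cases hie : i = a.toNat - 65
    · have hla : pvLetter i = a :=
        pv_char_toNat_inj (by rw [hLi, if_pos (by omega : i < 26)]; omega)
      rw [if_pos hla]
      subst hie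
      rw [List.getD_eq_getElem?_getD, List.getElem?_set_self (by omega)]
      rfl
    · have hla : ¬ pvLetter i = a := by
        intro hEq
        have := congrArg Char.toNat hEq
        rw [hLi] at this
        split_ifs at this <;> omega
      rw [if_neg hla, add_zero, List.getD_eq_getElem?_getD,
          List.getElem?_set_ne (by omega), ← List.getD_eq_getElem?_getD]
  · by_cases hlo : PySem.Chars.islower a = true
    · obtain ⟨h1, h2⟩ := (pv_islower_iff a).mp hlo
      have hpv : pvStepA count a
          = count.set (a.toNat - 97 + 26) (count.getD (a.toNat - 97 + 26) 0 + 1) := by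
        simp only [pvStepA, if_neg hu, hlo, if_true]
      rw [hpv]
      by_cases hie : i = a.toNat - 97 + 26
      · have hla : pvLetter i = a :=
          pv_char_toNat_inj (by rw [hLi, if_neg (by omega : ¬ i < 26)]; omega)
        rw [if_pos hla]
        subst hie
        rw [List.getD_eq_getElem?_getD, List.getElem?_set_self (by omega)]
        rfl
      · have hla : ¬ pvLetter i = a := by
          intro hEq
          have := congrArg Char.toNat hEq
          rw [hLi] at this
          split_ifs at this <;> omega
        rw [if_neg hla, add_zero, List.getD_eq_getElem?_getD,
            List.getElem?_set_ne (by omega), ← List.getD_eq_getElem?_getD]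
    · have hau : ¬ (65 ≤ a.toNat ∧ a.toNat ≤ 90) := fun h => hu ((pv_isupper_iff a).mpr h)
      have hal : ¬ (97 ≤ a.toNat ∧ a.toNat ≤ 122) := fun h => hlo ((pv_islower_iff a).mpr h)
      have hla : ¬ pvLetter i = a := by
        intro hEq
        have := congrArg Char.toNat hEq
        rw [hLi] at this
        split_ifs at this <;> omega
      have hpv : pvStepA count a = count := by
        simp only [pvStepA, if_neg hu, if_neg hlo]
      rw [hpv, if_neg hla, add_zero]

-- A's loop, read through getD: each slot i accumulates the count of letter i
theorem pvFoldA_getD (l : List Char) :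
    ∀ (count : List Int), count.length = 52 → ∀ i, i < 52 →
    (l.foldl pvStepA count).getD i 0 = count.getD i 0 + (l.count (pvLetter i) : Int) := by
  induction l with
  | nil => intro count _ i _; simp
  | cons a tl ih =>
    intro count hlen i hi
    have hstep : (pvStepA count a).length = 52 := by rw [pvStepA_length]; exact hlen
    simp only [List.foldl_cons]
    rw [ih _ hstep i hi, pvStepA_getD count hlen a i hi, List.count_cons]
    by_cases h : pvLetter i = a
    · subst h
      simp only [beq_self_eq_true, if_pos]
      push_cast
      ring
    · have h' : (a == pvLetter i) = false := by
        simp only [beq_eq_false_iff_ne, ne_eq]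
        exact fun e => h e.symm
      simp only [if_neg h, h', Bool.false_eq_true, if_false]
      push_cast
      ring

theorem pvFoldA_length (l : List Char) (count : List Int) :
    (l.foldl pvStepA count).length = count.length := by
  induction l generalizing count with
  | nil => rfl
  | cons a tl ih => simp only [List.foldl_cons]; rw [ih, pvStepA_length]

theorem pvAlphabet_len : pvAlphabet.length = 52 := by decide

theorem pv_solution_eq_foldA (s : String) :
    solution s = s.toList.foldl pvStepA (List.replicate 52 0) := rfl

-- ===== VERDICT =====
theorem solution_spec : Claim_equal_solution := by
  intro s _
  unfold Spec_solution solution_alt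
  rw [pv_solution_eq_foldA]
  apply List.ext_getElem
  · rw [pvFoldA_length, List.length_map, List.length_replicate, pvAlphabet_len]
  · intro i h1 h2
    have hi : i < 52 := by
      rw [List.length_map, pvAlphabet_len] at h2; exact h2
    have hA := pvFoldA_getD s.toList (List.replicate 52 0) (by simp) i hi
    rw [List.getD_eq_getElem _ _ h1] at hA
    rw [hA, List.getElem_map]
    have hlet : pvAlphabet[i]'(by rw [pvAlphabet_len]; exact hi) = pvLetter i := by
      unfold pvLetter
      rw [List.getD_eq_getElem _ _ (by rw [pvAlphabet_len]; exact hi)]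
    rw [hlet]
    have hz : (List.replicate 52 (0 : Int)).getD i 0 = 0 := by
      rw [List.getD_eq_getElem?_getD, List.getElem?_replicate]
      simp [hi]
    rw [hz, zero_add]
    have hcnt : PySem.Str.count s (String.ofList [pvLetter i]) = s.toList.count (pvLetter i) := by
      rw [PySem.Str.count_eq]
      have hmk : (String.ofList [pvLetter i]).toList = [pvLetter i] := by simp
      rw [hmk]
      exact pv_count_single s.toList (pvLetter i)
    rw [hcnt]
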